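-- pv_equiv track=rewrite | github.com/vermashresth/Referential_Shapes | analysis/utils.py | get_attributes_dicts
-- ===== SOURCE A (Python) =====
-- from collections import Counter
--
-- def get_feature_ids(message_metadata):
-- 	ids = []
-- 	for k, v_list in message_metadata.items():
-- 		flat_list = [item for sublist in v_list for item in sublist]
-- 		for v in flat_list:
-- 			if not v == None:
-- 				ids.append('{}_{}'.format(k[:-1], v))
--
-- 	return ids
--
-- def get_attributes_dicts(messages, metadata, idx_to_word):
-- 	token_to_attr = {}
-- 	attr_to_token = {}
--
-- 	for i, m in enumerate(messages):
-- 		feature_keys = get_feature_ids(metadata[i])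
--
-- 		for token_idx in m:
-- 			token = idx_to_word[token_idx]
-- 			if not token in token_to_attr:
-- 				token_to_attr[token] = Counter()
--
-- 			for feature_key in feature_keys:
-- 				token_to_attr[token][feature_key] += 1
--
-- 				if not feature_key in attr_to_token:
-- 					attr_to_token[feature_key] = Counter()
--
-- 				attr_to_token[feature_key][token] += 1
--
-- 	return token_to_attr, attr_to_token
-- ===== SOURCE B (Python) =====
-- from collections import Counter
--
--
-- def _feature_counter(message_metadata):
--     # ordered Counter of feature keys 'k[:-1]_v', keeping duplicate multiplicities
--     fc = Counter()
--     for k, v_list in message_metadata.items():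
--         for sublist in v_list:
--             for v in sublist:
--                 if v is not None:
--                     fc['{}_{}'.format(k[:-1], v)] += 1
--     return fc
--
--
-- def get_attributes_dicts(messages, metadata, idx_to_word):
--     # Pass 1: build ONE flat (token, feature_key) pair Counter plus an ordered
--     # seen-token set; no nested dict is touched in the hot loop.
--     pairs = Counter()
--     seen_tokens = {}
--     for m, md in zip(messages, metadata):
--         fc = _feature_counter(md)
--         for token_idx in m:
--             token = idx_to_word[token_idx]
--             seen_tokens[token] = None
--             pairs.update({(token, fk): c for fk, c in fc.items()})
--
--     # Pass 2: regroup the flat pair table into the two nested dicts.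
--     token_to_attr = {t: Counter() for t in seen_tokens}
--     attr_to_token = {}
--     for (token, fk), c in pairs.items():
--         token_to_attr[token][fk] = c
--         attr_to_token.setdefault(fk, Counter())[token] = c
--     return token_to_attr, attr_to_token
-- ===== Notes on version B (the rewrite author's own statement) =====
-- stated objective: alternative
-- what changed: B replaces A's in-loop double increment of two nested Counter dicts by a flat global (token, feature_key) pair Counter plus a seen-token ordered set built in one pass, then a separate regrouping pass that distributes the pair counts into token_to_attr and attr_to_token.
import Mathlib
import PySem

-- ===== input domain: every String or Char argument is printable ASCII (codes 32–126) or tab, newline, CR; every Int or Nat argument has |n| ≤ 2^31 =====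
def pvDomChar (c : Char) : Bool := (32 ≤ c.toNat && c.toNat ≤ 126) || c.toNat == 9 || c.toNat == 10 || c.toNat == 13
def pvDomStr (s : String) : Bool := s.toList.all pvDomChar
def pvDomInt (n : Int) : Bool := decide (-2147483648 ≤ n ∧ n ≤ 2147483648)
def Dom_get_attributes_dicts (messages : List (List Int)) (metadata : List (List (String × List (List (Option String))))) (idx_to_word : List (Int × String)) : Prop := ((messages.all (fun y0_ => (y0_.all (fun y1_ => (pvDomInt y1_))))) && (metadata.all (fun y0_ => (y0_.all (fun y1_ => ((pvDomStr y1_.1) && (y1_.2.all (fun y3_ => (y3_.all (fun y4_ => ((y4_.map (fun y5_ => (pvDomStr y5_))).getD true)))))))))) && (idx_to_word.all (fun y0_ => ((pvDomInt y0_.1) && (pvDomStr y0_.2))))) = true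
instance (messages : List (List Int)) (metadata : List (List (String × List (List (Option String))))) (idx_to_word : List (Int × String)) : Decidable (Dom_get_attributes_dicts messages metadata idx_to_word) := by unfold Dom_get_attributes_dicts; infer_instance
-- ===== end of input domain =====

-- B replaces A's in-loop double increment of the two nested Counter dicts by a flat global
-- (token, feature_key) pair Counter + ordered seen-token set built in one pass, followed by a
-- separate regrouping pass that distributes the pair counts into both nested dicts
-- (objective: alternative decomposition, same asymptotic cost).

-- ===== PORT A =====

-- '{}_{}'.format(k[:-1], v); k[:-1] drops the last character (empty string stays empty) — exact
def pvFkey (k : String) (v : String) : String :=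
  String.ofList (k.toList.dropLast ++ '_' :: v.toList)

def get_feature_ids (message_metadata : List (String × List (List (Option String)))) : List String :=
  message_metadata.foldl (fun ids kv =>
    let flat_list := kv.2.flatten
    flat_list.foldl (fun ids v =>
      match v with
      | some s => ids ++ [pvFkey kv.1 s]
      | none => ids) ids) []

def get_attributes_dicts (messages : List (List Int)) (metadata : List (List (String × List (List (Option String))))) (idx_to_word : List (Int × String)) : (List (String × List (String × Int))) × (List (String × List (String × Int))) :=
  let iw : PySem.Dict Int String := PySem.Dict.mk idx_to_word
  let st := (PySem.List.enumerate messages).foldl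
    (fun (st : PySem.Dict String (PySem.Dict String Int) × PySem.Dict String (PySem.Dict String Int)) im =>
      -- metadata[i]: in range under Pre_; iw.getD: key present under Pre_
      let feature_keys := get_feature_ids (PySem.List.pyGetD metadata im.1 [])
      im.2.foldl (fun st token_idx =>
        let token := iw.getD token_idx ""
        let st := if st.1.contains token then st else (st.1.insert token PySem.Dict.empty, st.2)
        feature_keys.foldl (fun st feature_key =>
          (st.1.modify token PySem.Dict.empty (fun c => c.modify feature_key 0 (· + 1)),
           (if st.2.contains feature_key then st.2 else st.2.insert feature_key PySem.Dict.empty).modify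
             feature_key PySem.Dict.empty (fun c => c.modify token 0 (· + 1)))) st) st)
    (PySem.Dict.empty, PySem.Dict.empty)
  (st.1.items.map (fun p => (p.1, p.2.items)), st.2.items.map (fun p => (p.1, p.2.items)))

-- ===== PORT B =====

def pvFeatureCounter (message_metadata : List (String × List (List (Option String)))) : PySem.Dict String Int :=
  message_metadata.foldl (fun fc kv =>
    kv.2.foldl (fun fc sublist =>
      sublist.foldl (fun fc v =>
        match v with
        | some s => fc.modify (pvFkey kv.1 s) 0 (· + 1)
        | none => fc) fc) fc) PySem.Dict.empty

def get_attributes_dicts_alt (messages : List (List Int)) (metadata : List (List (String × List (List (Option String))))) (idx_to_word : List (Int × String)) : (List (String × List (String × Int))) × (List (String × List (String × Int))) :=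
  let iw : PySem.Dict Int String := PySem.Dict.mk idx_to_word
  -- pass 1: flat (token, feature_key) pair Counter + ordered seen-token set
  let st := (messages.zip metadata).foldl
    (fun (st : PySem.Dict (String × String) Int × PySem.Set String) mmd =>
      let fc := pvFeatureCounter mmd.2
      mmd.1.foldl (fun st token_idx =>
        let token := iw.getD token_idx ""
        (fc.items.foldl (fun pr p => pr.modify (token, p.1) 0 (· + p.2)) st.1,
         PySem.Set.add st.2 token)) st)
    (PySem.Dict.empty, PySem.Set.empty)
  -- pass 2: regroup the pair table into the two nested dicts
  let tta0 : PySem.Dict String (PySem.Dict String Int) :=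
    st.2.foldl (fun d t => d.insert t PySem.Dict.empty) PySem.Dict.empty
  let fin := st.1.items.foldl
    (fun (f : PySem.Dict String (PySem.Dict String Int) × PySem.Dict String (PySem.Dict String Int)) q =>
      (f.1.modify q.1.1 PySem.Dict.empty (fun c => c.insert q.1.2 q.2),
       (f.2.setdefault q.1.2 PySem.Dict.empty).modify q.1.2 PySem.Dict.empty (fun c => c.insert q.1.1 q.2)))
    (tta0, PySem.Dict.empty)
  (fin.1.items.map (fun p => (p.1, p.2.items)), fin.2.items.map (fun p => (p.1, p.2.items)))

-- ===== PRECONDITION & SPEC =====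

-- Pre_ excludes exactly the inputs on which A raises: IndexError (metadata shorter than messages)
-- or KeyError (a token index of some message missing from idx_to_word).
def Pre_get_attributes_dicts (messages : List (List Int)) (metadata : List (List (String × List (List (Option String))))) (idx_to_word : List (Int × String)) : Prop :=
  messages.length ≤ metadata.length ∧
    ∀ m ∈ messages, ∀ t ∈ m, (PySem.Dict.mk idx_to_word).contains t = true
instance (messages : List (List Int)) (metadata : List (List (String × List (List (Option String))))) (idx_to_word : List (Int × String)) : Decidable (Pre_get_attributes_dicts messages metadata idx_to_word) := by unfold Pre_get_attributes_dicts; infer_instance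

def pvWitness_get_attributes_dicts : List (List Int) × (List (List (String × List (List (Option String))))) × (List (Int × String)) :=
  ([[0], [1, 0]], [[("ks", [[some "v", none], [some "v"]])], [("x", [[some "u"]])]], [(0, "w"), (1, "z")])

def Spec_get_attributes_dicts (messages : List (List Int)) (metadata : List (List (String × List (List (Option String))))) (idx_to_word : List (Int × String)) (out : (List (String × List (String × Int))) × (List (String × List (String × Int)))) : Prop := out = get_attributes_dicts_alt messages metadata idx_to_word
instance (messages : List (List Int)) (metadata : List (List (String × List (List (Option String))))) (idx_to_word : List (Int × String)) (out : (List (String × List (String × Int))) × (List (String × List (String × Int)))) : Decidable (Spec_get_attributes_dicts messages metadata idx_to_word out) := by unfold Spec_get_attributes_dicts; infer_instance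

-- ===== CLAIM (what is proved, stated in full; the proofs are below) =====
def Claim_equal_get_attributes_dicts : Prop := ∀ (messages : List (List Int)) (metadata : List (List (String × List (List (Option String))))) (idx_to_word : List (Int × String)), Dom_get_attributes_dicts messages metadata idx_to_word → Pre_get_attributes_dicts messages metadata idx_to_word → Spec_get_attributes_dicts messages metadata idx_to_word (get_attributes_dicts messages metadata idx_to_word)

-- ===== LEMMAS AND PROOFS =====

abbrev pvCnt : Type := PySem.Dict String Int
abbrev pvDD : Type := PySem.Dict String pvCnt
abbrev pvPD : Type := PySem.Dict (String × String) Int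

def pvLook (idx_to_word : List (Int × String)) (tidx : Int) : String := (PySem.Dict.mk idx_to_word).getD tidx ""

-- canonical flat data: the per-token-occurrence list of (token, feature keys of its message)
def pvS (messages : List (List Int)) (metadata : List (List (String × List (List (Option String))))) (idx_to_word : List (Int × String)) : List (String × List String) :=
  (messages.zip metadata).flatMap (fun p => p.1.map (fun ti => (pvLook idx_to_word ti, get_feature_ids p.2)))

-- the flat list of all (token, feature_key) pair occurrences
def pvLp (S : List (String × List String)) : List (String × String) :=
  S.flatMap (fun s => s.2.map (fun fk => (s.1, fk)))

def pvEns (d : pvDD) (k : String) : pvDD := if d.contains k then d else d.insert k PySem.Dict.empty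

-- per-occurrence steps of A (token side / attribute side)
def pvStep1 (d : pvDD) (s : String × List String) : pvDD :=
  s.2.foldl (fun d fk => d.modify s.1 PySem.Dict.empty (fun c => c.modify fk 0 (· + 1))) (pvEns d s.1)
def pvStep2 (d : pvDD) (s : String × List String) : pvDD :=
  s.2.foldl (fun d fk => (pvEns d fk).modify fk PySem.Dict.empty (fun c => c.modify s.1 0 (· + 1))) d

-- per-occurrence step of B's pair counter
def pvPStep (pr : pvPD) (s : String × List String) : pvPD :=
  (PySem.Dict.counter s.2).items.foldl (fun pr p => pr.modify (s.1, p.1) 0 (· + p.2)) pr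


-- ---------- generic Dict bookkeeping ----------

theorem pvDictEq {κ ν : Type} [BEq κ] [LawfulBEq κ] (d d' : PySem.Dict κ ν) (dflt : ν)
    (h1 : d.keys.Nodup) (hk : d.keys = d'.keys) (hv : ∀ k, d.getD k dflt = d'.getD k dflt) :
    d = d' := by
  apply PySem.Dict.ext
  rw [PySem.Dict.items_eq_map_keys d h1 dflt, PySem.Dict.items_eq_map_keys d' (hk ▸ h1) dflt, hk]
  exact List.map_congr_left (fun k _ => by rw [hv k])

theorem pvEnsContains (d : pvDD) (k : String) : (pvEns d k).contains k = true := by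
  unfold pvEns
  cases hc : d.contains k with
  | true => simp [hc]
  | false => simp [PySem.Dict.contains_insert_self]

theorem pvEnsKeys (d : pvDD) (k : String) : (pvEns d k).keys = PySem.Set.add d.keys k := by
  unfold pvEns
  cases hc : d.contains k with
  | true =>
    have hm : k ∈ d.keys := (PySem.Dict.contains_iff_mem_keys d k).mp hc
    simp [PySem.Set.add_of_mem hm]
  | false =>
    have hm : k ∉ d.keys := fun h => by
      rw [(PySem.Dict.contains_iff_mem_keys d k).mpr h] at hc; cases hc
    simp [PySem.Dict.keys_insert_of_not_contains d _ hc, PySem.Set.add_of_not_mem hm]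

theorem pvEnsGetD (d : pvDD) (k u : String) :
    (pvEns d k).getD u PySem.Dict.empty = d.getD u PySem.Dict.empty := by
  unfold pvEns
  cases hc : d.contains k with
  | true => simp
  | false =>
    simp only [Bool.false_eq_true, if_false, PySem.Dict.getD_insert]
    split_ifs with h
    · subst h; rw [PySem.Dict.getD_of_not_contains _ _ hc]
    · rfl

theorem pvSetdMod (att : pvDD) (k : String) (g : pvCnt → pvCnt) :
    (att.setdefault k PySem.Dict.empty).modify k PySem.Dict.empty g = att.modify k PySem.Dict.empty g := by
  cases hc : att.contains k with
  | true => rw [PySem.Dict.setdefault_of_contains _ _ hc]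
  | false =>
    rw [PySem.Dict.setdefault_of_not_contains _ _ hc]
    simp only [PySem.Dict.modify]
    rw [PySem.Dict.getD_insert_self, PySem.Dict.insert_insert_self,
      PySem.Dict.getD_of_not_contains _ _ hc]

theorem pvUpdAbsorb {s : PySem.Set String} {l : List String} (h : ∀ y ∈ l, y ∈ s) :
    PySem.Set.update s l = s := by
  rw [PySem.Set.update_eq_append_filter]
  have hnil : List.filter (fun y => !PySem.Set.contains s y) (PySem.Set.ofList l) = [] := by
    apply List.filter_eq_nil_iff.mpr
    intro y hy
    have hyl : y ∈ l := by rw [PySem.Set.mem_ofList] at hy; exact hy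
    have hc : PySem.Set.contains s y = true := by
      rw [PySem.Set.contains_iff]
      exact h y hyl
    rw [hc]
    simp
  rw [hnil, List.append_nil]

theorem pvItemsFilterCounter (l : List String) (fk : String) :
    (PySem.Dict.counter l).items.filter (fun p => p.1 == fk)
      = if fk ∈ l then [(fk, (l.count fk : Int))] else [] := by
  rw [PySem.Dict.items_counter, List.filter_map]
  have hcomp : ((fun (p : String × Int) => p.1 == fk) ∘ (fun k => (k, (List.count k l : Int)))) = (fun k => k == fk) := rfl
  rw [hcomp, List.filter_beq]
  by_cases hm : fk ∈ l
  · have h1 : List.count fk (PySem.Set.ofList l) = 1 :=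
      List.count_eq_one_of_mem (PySem.Set.nodup_ofList l) (by rw [PySem.Set.mem_ofList]; exact hm)
    rw [h1]
    simp [hm]
  · have h0 : List.count fk (PySem.Set.ofList l) = 0 :=
      List.count_eq_zero.mpr (fun hc => hm (by rw [PySem.Set.mem_ofList] at hc; exact hc))
    rw [h0]
    simp [hm]

-- value of a multi-key modify loop at one key
theorem pvGPg {κ β ν : Type} [BEq κ] [LawfulBEq κ] [DecidableEq κ] (l : List β) (key : β → κ)
    (dflt : ν) (f : β → ν → ν) (d : PySem.Dict κ ν) (k : κ) :
    (l.foldl (fun d x => d.modify (key x) dflt (f x)) d).getD k dflt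
      = (l.filter (fun x => key x == k)).foldl (fun c x => f x c) (d.getD k dflt) := by
  induction l generalizing d with
  | nil => simp
  | cons x xs ih =>
    simp only [List.foldl_cons, List.filter_cons]
    rw [ih]
    by_cases h : key x = k
    · subst h
      simp
    · have hb : (key x == k) = false := by simpa using h
      rw [hb]
      simp only [Bool.false_eq_true, if_false]
      rw [PySem.Dict.getD_modify]
      rw [if_neg (fun hh => h hh.symm)]

theorem pvT0getD (l : List String) (u : String) :
    (l.foldl (fun d t => d.insert t PySem.Dict.empty) (PySem.Dict.empty : pvDD)).getD u PySem.Dict.empty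
      = PySem.Dict.empty := by
  suffices h : ∀ (d : pvDD), (∀ v, d.getD v PySem.Dict.empty = PySem.Dict.empty) →
      ∀ v, (l.foldl (fun d t => d.insert t PySem.Dict.empty) d).getD v PySem.Dict.empty = PySem.Dict.empty by
    exact h PySem.Dict.empty (fun v => PySem.Dict.getD_empty v PySem.Dict.empty) u
  induction l with
  | nil => intro d hd v; exact hd v
  | cons t ts ih =>
    intro d hd v
    simp only [List.foldl_cons]
    apply ih
    intro w
    rw [PySem.Dict.getD_insert]
    split_ifs
    · rfl
    · exact hd w

theorem pvPairBeq {alpha beta : Type} [BEq alpha] [BEq beta] (a : alpha) (b : beta) (q : alpha × beta) :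
    ((a, b) == q) = (a == q.1 && b == q.2) := by
  cases q; rfl



-- ---------- ordered-dedup (Set.ofList) commutation lemmas ----------

theorem pvOfListFilter {alpha : Type} [BEq alpha] [LawfulBEq alpha] (p : alpha → Bool) (l : List alpha) :
    (PySem.Set.ofList l).filter p = PySem.Set.ofList (l.filter p) := by
  induction l using List.reverseRecOn with
  | nil => rfl
  | append_singleton l x ih =>
    rw [PySem.Set.ofList_append_singleton, List.filter_append]
    by_cases hx : x ∈ l
    · rw [PySem.Set.add_of_mem (by rw [PySem.Set.mem_ofList]; exact hx), ih]
      by_cases hp : p x = true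
      · simp only [List.filter_cons, hp, if_pos, List.filter_nil]
        rw [PySem.Set.ofList_append_singleton,
          PySem.Set.add_of_mem (by rw [PySem.Set.mem_ofList, List.mem_filter]; exact ⟨hx, hp⟩)]
      · simp [List.filter, hp]
    · rw [PySem.Set.add_of_not_mem (by rw [PySem.Set.mem_ofList]; exact hx), List.filter_append, ih]
      by_cases hp : p x = true
      · simp only [List.filter_cons, hp, if_pos, List.filter_nil]
        rw [PySem.Set.ofList_append_singleton,
          PySem.Set.add_of_not_mem (by rw [PySem.Set.mem_ofList, List.mem_filter]; exact fun h => hx h.1)]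
      · simp [List.filter, hp]

theorem pvOfListMap {alpha beta : Type} [BEq alpha] [LawfulBEq alpha] [BEq beta] [LawfulBEq beta]
    (f : alpha → beta) (l : List alpha) :
    PySem.Set.ofList ((PySem.Set.ofList l).map f) = PySem.Set.ofList (l.map f) := by
  induction l using List.reverseRecOn with
  | nil => rfl
  | append_singleton l x ih =>
    rw [PySem.Set.ofList_append_singleton, List.map_append]
    by_cases hx : x ∈ l
    · rw [PySem.Set.add_of_mem (by rw [PySem.Set.mem_ofList]; exact hx), ih]
      simp only [List.map_cons, List.map_nil]
      rw [PySem.Set.ofList_append_singleton,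
        PySem.Set.add_of_mem (by rw [PySem.Set.mem_ofList]; exact List.mem_map_of_mem hx)]
    · rw [PySem.Set.add_of_not_mem (by rw [PySem.Set.mem_ofList]; exact hx), List.map_append]
      simp only [List.map_cons, List.map_nil]
      rw [PySem.Set.ofList_append_singleton, PySem.Set.ofList_append_singleton, ih]

theorem pvOfListMapInj {alpha beta : Type} [BEq alpha] [LawfulBEq alpha] [BEq beta] [LawfulBEq beta]
    (f : alpha → beta) (l : List alpha) (hinj : ∀ a ∈ l, ∀ b ∈ l, f a = f b → a = b) :
    (PySem.Set.ofList l).map f = PySem.Set.ofList (l.map f) := by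
  induction l using List.reverseRecOn with
  | nil => rfl
  | append_singleton l x ih =>
    have hinj' : ∀ a ∈ l, ∀ b ∈ l, f a = f b → a = b := fun a ha b hb =>
      hinj a (List.mem_append_left _ ha) b (List.mem_append_left _ hb)
    rw [PySem.Set.ofList_append_singleton, List.map_append]
    by_cases hx : x ∈ l
    · rw [PySem.Set.add_of_mem (by rw [PySem.Set.mem_ofList]; exact hx), ih hinj']
      simp only [List.map_cons, List.map_nil]
      rw [PySem.Set.ofList_append_singleton,
        PySem.Set.add_of_mem (by rw [PySem.Set.mem_ofList]; exact List.mem_map_of_mem hx)]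
    · rw [PySem.Set.add_of_not_mem (by rw [PySem.Set.mem_ofList]; exact hx), List.map_append, ih hinj']
      simp only [List.map_cons, List.map_nil]
      rw [PySem.Set.ofList_append_singleton]
      have hfx : f x ∉ PySem.Set.ofList (l.map f) := by
        rw [PySem.Set.mem_ofList]
        intro hmem
        obtain ⟨a, ha, hfa⟩ := List.mem_map.mp hmem
        have : a = x := hinj a (List.mem_append_left _ ha) x (List.mem_append_right _ (List.mem_singleton_self x)) hfa
        exact hx (this ▸ ha)
      rw [PySem.Set.add_of_not_mem hfx]

theorem pvUpdOfListMap {alpha beta : Type} [BEq alpha] [LawfulBEq alpha] [BEq beta] [LawfulBEq beta]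
    (s : PySem.Set beta) (f : alpha → beta) (l : List alpha) :
    PySem.Set.update s ((PySem.Set.ofList l).map f) = PySem.Set.update s (l.map f) := by
  rw [PySem.Set.update_eq_append_filter, PySem.Set.update_eq_append_filter, pvOfListMap]

-- ---------- pair-list counting / projection lemmas ----------

theorem pvCountFM {alpha beta : Type} [BEq alpha] [LawfulBEq alpha] [BEq beta] [LawfulBEq beta]
    (l : List (alpha × beta)) (u : alpha) (b : beta) :
    l.count (u, b) = ((l.filter (fun q => q.1 == u)).map (fun q => q.2)).count b := by
  induction l with
  | nil => rfl
  | cons q t ih =>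
    obtain ⟨q1, q2⟩ := q
    rw [List.count_cons, List.filter_cons]
    by_cases h1 : q1 = u
    · subst h1
      have hpq : ((q1, q2) == (q1, b)) = (q2 == b) := by rw [pvPairBeq]; simp
      simp only [BEq.rfl, if_pos, List.map_cons, List.count_cons, ih, hpq]
    · have hbq : ((q1 : alpha) == u) = false := by simpa using h1
      have hb : ((q1, q2) == (u, b)) = false := by rw [pvPairBeq]; simp [h1]
      simp [hbq, hb, ih]

theorem pvCountFM2 {alpha beta : Type} [BEq alpha] [LawfulBEq alpha] [BEq beta] [LawfulBEq beta]
    (l : List (alpha × beta)) (a : alpha) (k : beta) :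
    l.count (a, k) = ((l.filter (fun q => q.2 == k)).map (fun q => q.1)).count a := by
  induction l with
  | nil => rfl
  | cons q t ih =>
    obtain ⟨q1, q2⟩ := q
    rw [List.count_cons, List.filter_cons]
    by_cases h2 : q2 = k
    · subst h2
      have hpq : ((q1, q2) == (a, q2)) = (q1 == a) := by rw [pvPairBeq]; simp
      simp only [BEq.rfl, if_pos, List.map_cons, List.count_cons, ih, hpq]
    · have hbq : ((q2 : beta) == k) = false := by simpa using h2
      have hb : ((q1, q2) == (a, k)) = false := by rw [pvPairBeq]; simp [h2]
      simp [hbq, hb, ih]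

theorem pvBlockFM {t u : String} (F : List String) :
    ((F.map (fun fk => (t, fk))).filter (fun q => q.1 == u)).map (fun q => q.2)
      = if t = u then F else [] := by
  rw [List.filter_map]
  have hcomp : ((fun (q : String × String) => q.1 == u) ∘ (fun fk => (t, fk))) = (fun _ => t == u) := rfl
  rw [hcomp]
  by_cases h : t = u
  · subst h; simp
  · have hb : ((t : String) == u) = false := by simpa using h
    simp [hb, h]

theorem pvBlockFM2 {t k : String} (F : List String) :
    ((F.map (fun fk => (t, fk))).filter (fun q => q.2 == k)).map (fun q => q.1)
      = (F.filter (fun fk => fk == k)).map (fun _ => t) := by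
  rw [List.filter_map]
  have hcomp : ((fun (q : String × String) => q.2 == k) ∘ (fun fk => (t, fk))) = (fun fk => fk == k) := rfl
  rw [hcomp, List.map_map]
  rfl

theorem pvCountBlock (t : String) (F : List String) (q : String × String) :
    (F.map (fun fk => (t, fk))).count q = if q.1 = t then F.count q.2 else 0 := by
  obtain ⟨a, b⟩ := q
  rw [pvCountFM, pvBlockFM]
  by_cases h : t = a
  · subst h; simp
  · rw [if_neg h, if_neg (fun hh => h hh.symm)]
    simp

theorem pvMemLp {S : List (String × List String)} {q : String × String} (h : q ∈ pvLp S) :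
    q.1 ∈ S.map (fun s => s.1) := by
  unfold pvLp at h
  obtain ⟨s, hs, hq⟩ := List.mem_flatMap.mp h
  obtain ⟨fk, _, rfl⟩ := List.mem_map.mp hq
  exact List.mem_map_of_mem hs

theorem pvLp_cons (s : String × List String) (S : List (String × List String)) :
    pvLp (s :: S) = s.2.map (fun fk => (s.1, fk)) ++ pvLp S := by
  simp [pvLp]


-- ---------- characterization of A's two folds ----------

theorem pvStep1Keys (d : pvDD) (s : String × List String) :
    (pvStep1 d s).keys = PySem.Set.add d.keys s.1 := by
  unfold pvStep1
  rw [PySem.Dict.keys_foldl_modify_key s.2 (fun _ => s.1) PySem.Dict.empty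
    (fun _ fk => fun c => c.modify fk 0 (· + 1)) (pvEns d s.1), pvEnsKeys]
  apply pvUpdAbsorb
  intro y hy
  obtain ⟨_, _, rfl⟩ := List.mem_map.mp hy
  exact (PySem.Set.mem_add _ _ _).mpr (Or.inr rfl)

theorem pvK1 (S : List (String × List String)) : ∀ (d : pvDD),
    (S.foldl pvStep1 d).keys = PySem.Set.update d.keys (S.map (fun s => s.1)) := by
  induction S with
  | nil => intro d; simp [PySem.Set.update_nil]
  | cons s S ih =>
    intro d
    simp only [List.foldl_cons, List.map_cons]
    rw [ih, pvStep1Keys, PySem.Set.update_cons]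

theorem pvStep1GetD (d : pvDD) (s : String × List String) (u : String) :
    (pvStep1 d s).getD u PySem.Dict.empty
      = (if s.1 = u then s.2 else []).foldl (fun c fk => c.modify fk 0 (· + 1)) (d.getD u PySem.Dict.empty) := by
  unfold pvStep1
  rw [pvGPg s.2 (fun _ => s.1) PySem.Dict.empty (fun fk => fun c => c.modify fk 0 (· + 1)) (pvEns d s.1) u,
    pvEnsGetD]
  by_cases h : s.1 = u
  · simp [h]
  · have hb : ((s.1 : String) == u) = false := by simpa using h
    simp [hb, h]

theorem pvG1 (S : List (String × List String)) : ∀ (d : pvDD) (u : String),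
    (S.foldl pvStep1 d).getD u PySem.Dict.empty
      = (((pvLp S).filter (fun q => q.1 == u)).map (fun q => q.2)).foldl
          (fun c fk => c.modify fk 0 (· + 1)) (d.getD u PySem.Dict.empty) := by
  induction S with
  | nil => intro d u; simp [pvLp]
  | cons s S ih =>
    intro d u
    simp only [List.foldl_cons]
    rw [ih, pvStep1GetD, pvLp_cons, List.filter_append, List.map_append, List.foldl_append, pvBlockFM]

theorem pvStep2Keys (d : pvDD) (s : String × List String) :
    (pvStep2 d s).keys = PySem.Set.update d.keys s.2 := by
  unfold pvStep2
  suffices h : ∀ (F : List String) (d : pvDD),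
      (F.foldl (fun d fk => (pvEns d fk).modify fk PySem.Dict.empty (fun c => c.modify s.1 0 (· + 1))) d).keys
        = PySem.Set.update d.keys F by exact h s.2 d
  intro F
  induction F with
  | nil => intro d; simp [PySem.Set.update_nil]
  | cons fk F ih =>
    intro d
    simp only [List.foldl_cons]
    rw [ih, PySem.Set.update_cons]
    congr 1
    simp only [PySem.Dict.modify]
    rw [PySem.Dict.keys_insert_of_contains _ _ (pvEnsContains d fk), pvEnsKeys]

theorem pvStep2GetD (d : pvDD) (s : String × List String) (k : String) :
    (pvStep2 d s).getD k PySem.Dict.empty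
      = (s.2.filter (fun fk => fk == k)).foldl (fun c _ => c.modify s.1 0 (· + 1)) (d.getD k PySem.Dict.empty) := by
  unfold pvStep2
  suffices h : ∀ (F : List String) (d : pvDD),
      (F.foldl (fun d fk => (pvEns d fk).modify fk PySem.Dict.empty (fun c => c.modify s.1 0 (· + 1))) d).getD k PySem.Dict.empty
        = (F.filter (fun fk => fk == k)).foldl (fun c _ => c.modify s.1 0 (· + 1)) (d.getD k PySem.Dict.empty) by
    exact h s.2 d
  intro F
  induction F with
  | nil => intro d; rfl
  | cons fk F ih =>
    intro d
    simp only [List.foldl_cons, List.filter_cons]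
    rw [ih, PySem.Dict.getD_modify, pvEnsGetD]
    by_cases h : fk = k
    · subst h
      simp
    · have hb : ((fk : String) == k) = false := by simpa using h
      rw [hb, if_neg (fun hh => h hh.symm), pvEnsGetD]
      simp

theorem pvK2 (S : List (String × List String)) : ∀ (d : pvDD),
    (S.foldl pvStep2 d).keys = PySem.Set.update d.keys ((pvLp S).map (fun q => q.2)) := by
  induction S with
  | nil => intro d; simp [pvLp, PySem.Set.update_nil]
  | cons s S ih =>
    intro d
    simp only [List.foldl_cons]
    rw [ih, pvStep2Keys, pvLp_cons, List.map_append, PySem.Set.update_append]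
    congr 2
    simp [List.map_map]

theorem pvG2 (S : List (String × List String)) : ∀ (d : pvDD) (k : String),
    (S.foldl pvStep2 d).getD k PySem.Dict.empty
      = (((pvLp S).filter (fun q => q.2 == k)).map (fun q => q.1)).foldl
          (fun c t => c.modify t 0 (· + 1)) (d.getD k PySem.Dict.empty) := by
  induction S with
  | nil => intro d k; simp [pvLp]
  | cons s S ih =>
    intro d k
    simp only [List.foldl_cons]
    rw [ih, pvStep2GetD, pvLp_cons, List.filter_append, List.map_append, List.foldl_append, pvBlockFM2]
    congr 1
    rw [List.foldl_map]

-- ---------- characterization of B's pair counter ----------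

theorem pvPStepKeys (pr : pvPD) (s : String × List String) :
    (pvPStep pr s).keys = PySem.Set.update pr.keys (s.2.map (fun fk => (s.1, fk))) := by
  unfold pvPStep
  rw [PySem.Dict.keys_foldl_modify_key ((PySem.Dict.counter s.2).items) (fun p => (s.1, p.1)) 0
    (fun _ p => (· + p.2)) pr, PySem.Dict.items_counter, List.map_map]
  have hcomp : ((fun (p : String × Int) => ((s.1 : String), p.1)) ∘ (fun k => (k, (List.count k s.2 : Int))))
      = (fun fk => (s.1, fk)) := rfl
  rw [hcomp, pvUpdOfListMap]

theorem pvPStepGetD (pr : pvPD) (s : String × List String) (q : String × String) :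
    (pvPStep pr s).getD q 0 = pr.getD q 0 + ((s.2.map (fun fk => (s.1, fk))).count q : Int) := by
  unfold pvPStep
  rw [pvGPg ((PySem.Dict.counter s.2).items) (fun p => (s.1, p.1)) 0 (fun p => (· + p.2)) pr q,
    pvCountBlock]
  by_cases hq : q.1 = s.1
  · have hcongr : (PySem.Dict.counter s.2).items.filter (fun p => ((s.1, p.1) == q))
        = (PySem.Dict.counter s.2).items.filter (fun p => (p.1 == q.2)) := by
      apply List.filter_congr
      intro p _
      rw [pvPairBeq]
      have hb : ((s.1 : String) == q.1) = true := by simpa using hq.symm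
      rw [hb, Bool.true_and]
    rw [hcongr, pvItemsFilterCounter, if_pos hq]
    by_cases hm : q.2 ∈ s.2
    · simp [hm]
    · have h0 : s.2.count q.2 = 0 := List.count_eq_zero.mpr hm
      simp [hm, h0]
  · have hcongr : (PySem.Dict.counter s.2).items.filter (fun p => ((s.1, p.1) == q)) = [] := by
      apply List.filter_eq_nil_iff.mpr
      intro p _
      rw [pvPairBeq]
      have hb : ((s.1 : String) == q.1) = false := by simpa using (fun h => hq h.symm)
      rw [hb, Bool.false_and]
      simp
    rw [hcongr, if_neg hq]
    simp

theorem pvKp (S : List (String × List String)) : ∀ (pr : pvPD),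
    (S.foldl pvPStep pr).keys = PySem.Set.update pr.keys (pvLp S) := by
  induction S with
  | nil => intro pr; simp [pvLp, PySem.Set.update_nil]
  | cons s S ih =>
    intro pr
    simp only [List.foldl_cons]
    rw [ih, pvPStepKeys, pvLp_cons, PySem.Set.update_append]

theorem pvGp (S : List (String × List String)) : ∀ (pr : pvPD) (q : String × String),
    (S.foldl pvPStep pr).getD q 0 = pr.getD q 0 + ((pvLp S).count q : Int) := by
  induction S with
  | nil => intro pr q; simp [pvLp]
  | cons s S ih =>
    intro pr q
    simp only [List.foldl_cons]
    rw [ih, pvPStepGetD, pvLp_cons, List.count_append]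
    push_cast
    ring

theorem pvPairsEq (S : List (String × List String)) :
    S.foldl pvPStep PySem.Dict.empty = PySem.Dict.counter (pvLp S) := by
  apply pvDictEq _ _ 0
  · rw [pvKp]
    simp only [PySem.Dict.keys_empty, PySem.Set.update_nil_left]
    exact PySem.Set.nodup_ofList _
  · rw [pvKp, PySem.Dict.keys_counter]
    simp [PySem.Set.update_nil_left]
  · intro q
    rw [pvGp, PySem.Dict.getD_counter, PySem.Dict.getD_empty]
    simp


-- ---------- the regrouping pass rebuilds the per-key counters ----------

theorem pvRegroup1 (L : List (String × String)) (u : String) :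
    ((PySem.Dict.counter L).items.filter (fun z => z.1.1 == u)).foldl
        (fun c z => c.insert z.1.2 z.2) (PySem.Dict.empty : pvCnt)
      = PySem.Dict.counter ((L.filter (fun q => q.1 == u)).map (fun q => q.2)) := by
  have hMfst : ∀ q ∈ (PySem.Set.ofList L).filter (fun q => q.1 == u), q.1 = u := by
    intro q hq
    exact eq_of_beq (List.mem_filter.mp hq).2
  have hMnd : ((PySem.Set.ofList L).filter (fun q => q.1 == u)).Nodup :=
    (PySem.Set.nodup_ofList L).filter _
  have hsnd : (((PySem.Set.ofList L).filter (fun q => q.1 == u)).map (fun q => q.2)).Nodup := by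
    apply hMnd.map_on
    intro q1 h1 q2 h2 heq
    exact Prod.ext ((hMfst q1 h1).trans (hMfst q2 h2).symm) heq
  have hfilter : (PySem.Dict.counter L).items.filter (fun z => z.1.1 == u)
      = ((PySem.Set.ofList L).filter (fun q => q.1 == u)).map (fun q => (q, (L.count q : Int))) := by
    rw [PySem.Dict.items_counter, List.filter_map]
    rfl
  have hX : ((PySem.Set.ofList L).filter (fun q => q.1 == u)).map (fun q => q.2)
      = PySem.Set.ofList ((L.filter (fun q => q.1 == u)).map (fun q => q.2)) := by
    rw [pvOfListFilter]
    apply pvOfListMapInj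
    intro a ha b hb heq
    have ha1 : a.1 = u := eq_of_beq (List.mem_filter.mp ha).2
    have hb1 : b.1 = u := eq_of_beq (List.mem_filter.mp hb).2
    exact Prod.ext (ha1.trans hb1.symm) heq
  apply PySem.Dict.ext
  rw [hfilter, List.foldl_map,
    PySem.Dict.items_foldl_insert_fresh _ (fun q => q.2) (fun q => (L.count q : Int)) PySem.Dict.empty
      (fun a _ => PySem.Dict.contains_empty _) hsnd,
    PySem.Dict.items_counter, ← hX, List.map_map]
  have hempty : (PySem.Dict.empty : pvCnt).items = [] := rfl
  rw [hempty, List.nil_append]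
  apply List.map_congr_left
  intro q hq
  have hq1 : q.1 = u := hMfst q hq
  have : L.count q = ((L.filter (fun q => q.1 == u)).map (fun q => q.2)).count q.2 := by
    conv_lhs => rw [show q = (u, q.2) from Prod.ext hq1 rfl]
    exact pvCountFM L u q.2
  simp [Function.comp, this]

theorem pvRegroup2 (L : List (String × String)) (k : String) :
    ((PySem.Dict.counter L).items.filter (fun z => z.1.2 == k)).foldl
        (fun c z => c.insert z.1.1 z.2) (PySem.Dict.empty : pvCnt)
      = PySem.Dict.counter ((L.filter (fun q => q.2 == k)).map (fun q => q.1)) := by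
  have hMsnd : ∀ q ∈ (PySem.Set.ofList L).filter (fun q => q.2 == k), q.2 = k := by
    intro q hq
    exact eq_of_beq (List.mem_filter.mp hq).2
  have hMnd : ((PySem.Set.ofList L).filter (fun q => q.2 == k)).Nodup :=
    (PySem.Set.nodup_ofList L).filter _
  have hfst : (((PySem.Set.ofList L).filter (fun q => q.2 == k)).map (fun q => q.1)).Nodup := by
    apply hMnd.map_on
    intro q1 h1 q2 h2 heq
    exact Prod.ext heq ((hMsnd q1 h1).trans (hMsnd q2 h2).symm)
  have hfilter : (PySem.Dict.counter L).items.filter (fun z => z.1.2 == k)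
      = ((PySem.Set.ofList L).filter (fun q => q.2 == k)).map (fun q => (q, (L.count q : Int))) := by
    rw [PySem.Dict.items_counter, List.filter_map]
    rfl
  have hY : ((PySem.Set.ofList L).filter (fun q => q.2 == k)).map (fun q => q.1)
      = PySem.Set.ofList ((L.filter (fun q => q.2 == k)).map (fun q => q.1)) := by
    rw [pvOfListFilter]
    apply pvOfListMapInj
    intro a ha b hb heq
    have ha2 : a.2 = k := eq_of_beq (List.mem_filter.mp ha).2
    have hb2 : b.2 = k := eq_of_beq (List.mem_filter.mp hb).2
    exact Prod.ext heq (ha2.trans hb2.symm)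
  apply PySem.Dict.ext
  rw [hfilter, List.foldl_map,
    PySem.Dict.items_foldl_insert_fresh _ (fun q => q.1) (fun q => (L.count q : Int)) PySem.Dict.empty
      (fun a _ => PySem.Dict.contains_empty _) hfst,
    PySem.Dict.items_counter, ← hY, List.map_map]
  have hempty : (PySem.Dict.empty : pvCnt).items = [] := rfl
  rw [hempty, List.nil_append]
  apply List.map_congr_left
  intro q hq
  have hq2 : q.2 = k := hMsnd q hq
  have : L.count q = ((L.filter (fun q => q.2 == k)).map (fun q => q.1)).count q.1 := by
    conv_lhs => rw [show q = (q.1, k) from Prod.ext rfl hq2]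
    exact pvCountFM2 L q.1 k
  simp [Function.comp, this]

-- ---------- A's folds equal B's regrouped dicts ----------

theorem pvFin1Eq (S : List (String × List String)) :
    S.foldl pvStep1 PySem.Dict.empty
      = (PySem.Dict.counter (pvLp S)).items.foldl
          (fun d q => d.modify q.1.1 PySem.Dict.empty (fun c => c.insert q.1.2 q.2))
          ((PySem.Set.ofList (S.map (fun s => s.1))).foldl
            (fun d t => d.insert t PySem.Dict.empty) PySem.Dict.empty) := by
  have htta0keys : ((PySem.Set.ofList (S.map (fun s => s.1))).foldl
      (fun d t => d.insert t PySem.Dict.empty) (PySem.Dict.empty : pvDD)).keys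
        = PySem.Set.ofList (S.map (fun s => s.1)) := by
    rw [PySem.Dict.keys_foldl_insert _ (fun _ _ => PySem.Dict.empty)]
    simp only [PySem.Dict.keys_empty, PySem.Set.update_nil_left]
    exact PySem.Set.ofList_ofList _
  apply pvDictEq _ _ PySem.Dict.empty
  · rw [pvK1]
    simp only [PySem.Dict.keys_empty, PySem.Set.update_nil_left]
    exact PySem.Set.nodup_ofList _
  · rw [pvK1,
      PySem.Dict.keys_foldl_modify_key _ (fun (q : (String × String) × Int) => q.1.1) PySem.Dict.empty
        (fun _ q => (fun c => c.insert q.1.2 q.2)) _, htta0keys,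
      PySem.Dict.items_counter, List.map_map]
    have hcomp : ((fun (q : (String × String) × Int) => q.1.1) ∘ (fun q => (q, ((pvLp S).count q : Int))))
        = (fun (q : String × String) => q.1) := rfl
    rw [hcomp]
    simp only [PySem.Dict.keys_empty, PySem.Set.update_nil_left]
    rw [pvUpdAbsorb]
    intro y hy
    obtain ⟨q, hq, rfl⟩ := List.mem_map.mp hy
    rw [PySem.Set.mem_ofList]
    exact pvMemLp ((PySem.Set.mem_ofList _ _).mp hq)
  · intro u
    rw [pvG1,
      pvGPg _ (fun (q : (String × String) × Int) => q.1.1) PySem.Dict.empty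
        (fun q => (fun c => c.insert q.1.2 q.2)) _ u,
      pvT0getD, PySem.Dict.getD_empty, pvRegroup1, PySem.Dict.counter_eq_foldl]

theorem pvFin2Eq (S : List (String × List String)) :
    S.foldl pvStep2 PySem.Dict.empty
      = (PySem.Dict.counter (pvLp S)).items.foldl
          (fun d q => (d.setdefault q.1.2 PySem.Dict.empty).modify q.1.2 PySem.Dict.empty
            (fun c => c.insert q.1.1 q.2))
          PySem.Dict.empty := by
  have hcollapse : (PySem.Dict.counter (pvLp S)).items.foldl
      (fun d q => (d.setdefault q.1.2 PySem.Dict.empty).modify q.1.2 PySem.Dict.empty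
        (fun c => c.insert q.1.1 q.2)) (PySem.Dict.empty : pvDD)
      = (PySem.Dict.counter (pvLp S)).items.foldl
          (fun d q => d.modify q.1.2 PySem.Dict.empty (fun c => c.insert q.1.1 q.2)) PySem.Dict.empty :=
    PySem.List.foldl_congr_mem _ _ _ _ (fun d q _ => pvSetdMod d q.1.2 _)
  rw [hcollapse]
  apply pvDictEq _ _ PySem.Dict.empty
  · rw [pvK2]
    simp only [PySem.Dict.keys_empty, PySem.Set.update_nil_left]
    exact PySem.Set.nodup_ofList _
  · rw [pvK2,
      PySem.Dict.keys_foldl_modify_key _ (fun (q : (String × String) × Int) => q.1.2) PySem.Dict.empty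
        (fun _ q => (fun c => c.insert q.1.1 q.2)) _,
      PySem.Dict.items_counter, List.map_map]
    have hcomp : ((fun (q : (String × String) × Int) => q.1.2) ∘ (fun q => (q, ((pvLp S).count q : Int))))
        = (fun (q : String × String) => q.2) := rfl
    rw [hcomp]
    simp only [PySem.Dict.keys_empty, PySem.Set.update_nil_left]
    rw [← pvOfListMap]
  · intro k
    rw [pvG2,
      pvGPg _ (fun (q : (String × String) × Int) => q.1.2) PySem.Dict.empty
        (fun q => (fun c => c.insert q.1.1 q.2)) _ k]
    simp only [PySem.Dict.getD_empty]
    rw [pvRegroup2, PySem.Dict.counter_eq_foldl]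


-- ---------- the feature-key helpers agree ----------

theorem pvMatchApp (g : String → String) (l : List (Option String)) :
    ∀ ids : List String,
      l.foldl (fun ids v => match v with | some s => ids ++ [g s] | none => ids) ids
        = ids ++ l.filterMap (fun v => v.map g) := by
  induction l with
  | nil => intro ids; simp
  | cons v vs ih =>
    intro ids
    cases v with
    | none => simpa using ih ids
    | some s => simp [ih]

theorem pvMatchCnt (g : String → String) (l : List (Option String)) :
    ∀ c : pvCnt,
      l.foldl (fun c v => match v with | some s => c.modify (g s) 0 (· + 1) | none => c) c
        = (l.filterMap (fun v => v.map g)).foldl (fun c s => c.modify s 0 (· + 1)) c := by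
  induction l with
  | nil => intro c; rfl
  | cons v vs ih =>
    intro c
    cases v with
    | none => simpa using ih c
    | some s => simp [ih]

def pvBlk (kv : String × List (List (Option String))) : List String :=
  kv.2.flatten.filterMap (fun v => v.map (pvFkey kv.1))

theorem pvIds_eq (md : List (String × List (List (Option String)))) :
    get_feature_ids md = md.flatMap pvBlk := by
  unfold get_feature_ids
  have e1 : ∀ kv (ids : List String),
      (kv.2.flatten.foldl (fun ids v => match v with | some s => ids ++ [pvFkey kv.1 s] | none => ids) ids)
        = ids ++ pvBlk kv := fun kv ids => pvMatchApp (pvFkey kv.1) kv.2.flatten ids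
  calc md.foldl (fun ids kv => kv.2.flatten.foldl (fun ids v => match v with | some s => ids ++ [pvFkey kv.1 s] | none => ids) ids) []
      = md.foldl (fun ids kv => ids ++ pvBlk kv) [] :=
        PySem.List.foldl_congr_mem md _ _ [] (fun ids kv _ => e1 kv ids)
    _ = [] ++ md.flatMap pvBlk := PySem.List.foldl_append_eq_flatMap pvBlk md []
    _ = md.flatMap pvBlk := by simp

theorem pvFC_eq (md : List (String × List (List (Option String)))) :
    pvFeatureCounter md = PySem.Dict.counter (get_feature_ids md) := by
  unfold pvFeatureCounter
  rw [pvIds_eq, PySem.Dict.counter_eq_foldl, List.foldl_flatMap]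
  apply PySem.List.foldl_congr_mem
  intro fc kv _
  rw [← List.foldl_flatten, pvMatchCnt (pvFkey kv.1) kv.2.flatten fc]
  rfl

-- ---------- reduction of PORT A to the canonical flat fold ----------

def pvL (messages : List (List Int)) (metadata : List (List (String × List (List (Option String))))) (iw : PySem.Dict Int String) : List (List String × List String) :=
  (messages.zip metadata).map (fun p => (p.1.map (fun ti => iw.getD ti ""), get_feature_ids p.2))

def pvStepTA (tta : pvDD) (x : List String × List String) : pvDD :=
  x.1.foldl (fun tta token => x.2.foldl (fun t fk => t.modify token PySem.Dict.empty (fun c => c.modify fk 0 (· + 1))) (pvEns tta token)) tta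
def pvStepAA (att : pvDD) (x : List String × List String) : pvDD :=
  x.1.foldl (fun att token => x.2.foldl (fun att fk => (pvEns att fk).modify fk PySem.Dict.empty (fun c => c.modify token 0 (· + 1))) att) att

theorem pvEnumCons (m : List Int) (ms : List (List Int)) (s : Int) :
    PySem.List.enumerate (m :: ms) s = (s, m) :: PySem.List.enumerate ms (s + 1) := by
  simp [PySem.List.enumerate]

theorem pvEnumZip {σ M : Type} (F : σ → M → List Int → σ) (dflt : M) :
    ∀ (msgs : List (List Int)) (mds pre : List M) (st : σ), msgs.length ≤ mds.length →
    (PySem.List.enumerate msgs (pre.length : Int)).foldl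
        (fun st im => F st (PySem.List.pyGetD (pre ++ mds) im.1 dflt) im.2) st
      = (msgs.zip mds).foldl (fun st p => F st p.2 p.1) st := by
  intro msgs
  induction msgs with
  | nil => intro mds pre st _; rfl
  | cons m ms ih =>
    intro mds pre st hlen
    cases mds with
    | nil => simp at hlen
    | cons d ds =>
      rw [pvEnumCons]
      simp only [List.foldl_cons, List.zip_cons_cons]
      have e1 : PySem.List.pyGetD (pre ++ d :: ds) (pre.length : Int) dflt = d := by
        rw [PySem.List.pyGetD_natCast]
        rw [List.getD_eq_getElem?_getD, List.getElem?_append_right (Nat.le_refl _)]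
        simp
      rw [e1]
      have e2 : (pre.length : Int) + 1 = ((pre ++ [d]).length : Int) := by
        simp
      rw [e2]
      have e3 : pre ++ d :: ds = (pre ++ [d]) ++ ds := by simp
      rw [e3]
      exact ih ds (pre ++ [d]) (F st d m) (by simpa using hlen)

def pvTF (idx_to_word : List (Int × String)) (p : List Int × List (String × List (List (Option String)))) : List String × List String :=
  (p.1.map (pvLook idx_to_word), get_feature_ids p.2)

def pvFA (idx_to_word : List (Int × String)) (st : pvDD × pvDD) (md : List (String × List (List (Option String)))) (m : List Int) : pvDD × pvDD :=
  m.foldl (fun st token_idx =>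
    let token := pvLook idx_to_word token_idx
    let st := if st.1.contains token then st else (st.1.insert token PySem.Dict.empty, st.2)
    (get_feature_ids md).foldl (fun st feature_key =>
      (st.1.modify token PySem.Dict.empty (fun c => c.modify feature_key 0 (· + 1)),
       (if st.2.contains feature_key then st.2 else st.2.insert feature_key PySem.Dict.empty).modify
         feature_key PySem.Dict.empty (fun c => c.modify token 0 (· + 1)))) st) st

theorem pvMsgA (idx_to_word : List (Int × String)) (p : List Int × List (String × List (List (Option String)))) (st : pvDD × pvDD) :
    pvFA idx_to_word st p.2 p.1 = (pvStepTA st.1 (pvTF idx_to_word p), pvStepAA st.2 (pvTF idx_to_word p)) := by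
  have hts : ∀ (st : pvDD × pvDD) (tidx : Int),
      (let token := pvLook idx_to_word tidx;
       let st2 := if st.1.contains token then st else (st.1.insert token PySem.Dict.empty, st.2);
       (get_feature_ids p.2).foldl (fun st feature_key =>
         (st.1.modify token PySem.Dict.empty (fun c => c.modify feature_key 0 (· + 1)),
          (if st.2.contains feature_key then st.2 else st.2.insert feature_key PySem.Dict.empty).modify
            feature_key PySem.Dict.empty (fun c => c.modify token 0 (· + 1)))) st2)
      = ((get_feature_ids p.2).foldl (fun s1 feature_key =>
            s1.modify (pvLook idx_to_word tidx) PySem.Dict.empty (fun c => c.modify feature_key 0 (· + 1)))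
            (pvEns st.1 (pvLook idx_to_word tidx)),
         (get_feature_ids p.2).foldl (fun s2 feature_key =>
            (pvEns s2 feature_key).modify feature_key PySem.Dict.empty
              (fun c => c.modify (pvLook idx_to_word tidx) 0 (· + 1))) st.2) := by
    intro st tidx
    show ((get_feature_ids p.2).foldl _
        (if st.1.contains (pvLook idx_to_word tidx) then st
         else (st.1.insert (pvLook idx_to_word tidx) PySem.Dict.empty, st.2))) = _
    have hite : (if st.1.contains (pvLook idx_to_word tidx) then st
         else (st.1.insert (pvLook idx_to_word tidx) PySem.Dict.empty, st.2))
        = (pvEns st.1 (pvLook idx_to_word tidx), st.2) := by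
      unfold pvEns
      by_cases hc : st.1.contains (pvLook idx_to_word tidx) <;> simp [hc]
    rw [hite]
    exact PySem.List.foldl_prod_mk
      (fun s1 feature_key => s1.modify (pvLook idx_to_word tidx) PySem.Dict.empty (fun c => c.modify feature_key 0 (· + 1)))
      (fun s2 feature_key => (pvEns s2 feature_key).modify feature_key PySem.Dict.empty (fun c => c.modify (pvLook idx_to_word tidx) 0 (· + 1)))
      (get_feature_ids p.2) (pvEns st.1 (pvLook idx_to_word tidx)) st.2
  refine Eq.trans (PySem.List.foldl_congr_mem p.1 _ _ st (fun acc tidx _ => hts acc tidx)) ?_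
  refine Eq.trans (PySem.List.foldl_prod_mk
      (fun s1 tidx => (get_feature_ids p.2).foldl (fun s1' feature_key =>
        s1'.modify (pvLook idx_to_word tidx) PySem.Dict.empty (fun c => c.modify feature_key 0 (· + 1)))
        (pvEns s1 (pvLook idx_to_word tidx)))
      (fun s2 tidx => (get_feature_ids p.2).foldl (fun s2' feature_key =>
        (pvEns s2' feature_key).modify feature_key PySem.Dict.empty (fun c => c.modify (pvLook idx_to_word tidx) 0 (· + 1)))
        s2)
      p.1 st.1 st.2) ?_
  simp only [pvStepTA, pvStepAA, pvTF, List.foldl_map]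

theorem pvA_core (messages : List (List Int)) (metadata : List (List (String × List (List (Option String))))) (idx_to_word : List (Int × String))
    (h : messages.length ≤ metadata.length) :
    get_attributes_dicts messages metadata idx_to_word =
      ((((pvL messages metadata (PySem.Dict.mk idx_to_word)).foldl pvStepTA PySem.Dict.empty).items.map (fun p => (p.1, p.2.items))),
       (((pvL messages metadata (PySem.Dict.mk idx_to_word)).foldl pvStepAA PySem.Dict.empty).items.map (fun p => (p.1, p.2.items)))) := by
  have key1 := pvEnumZip (pvFA idx_to_word) [] messages metadata [] (PySem.Dict.empty, PySem.Dict.empty) h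
  have key2 : (messages.zip metadata).foldl (fun st p => pvFA idx_to_word st p.2 p.1) (PySem.Dict.empty, PySem.Dict.empty)
      = (messages.zip metadata).foldl (fun st p => (pvStepTA st.1 (pvTF idx_to_word p), pvStepAA st.2 (pvTF idx_to_word p))) (PySem.Dict.empty, PySem.Dict.empty) :=
    PySem.List.foldl_congr_mem _ _ _ _ (fun st p _ => pvMsgA idx_to_word p st)
  have key3 := PySem.List.foldl_prod_mk
    (fun s1 p => pvStepTA s1 (pvTF idx_to_word p)) (fun s2 p => pvStepAA s2 (pvTF idx_to_word p))
    (messages.zip metadata) PySem.Dict.empty PySem.Dict.empty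
  have c1 : (messages.zip metadata).foldl (fun s1 p => pvStepTA s1 (pvTF idx_to_word p)) PySem.Dict.empty
      = (pvL messages metadata (PySem.Dict.mk idx_to_word)).foldl pvStepTA PySem.Dict.empty := by
    rw [pvL, List.foldl_map]
    rfl
  have c2 : (messages.zip metadata).foldl (fun s2 p => pvStepAA s2 (pvTF idx_to_word p)) PySem.Dict.empty
      = (pvL messages metadata (PySem.Dict.mk idx_to_word)).foldl pvStepAA PySem.Dict.empty := by
    rw [pvL, List.foldl_map]
    rfl
  have key : (PySem.List.enumerate messages ((([] : List (List (String × List (List (Option String))))).length : Nat) : Int)).foldl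
        (fun st im => pvFA idx_to_word st (PySem.List.pyGetD ([] ++ metadata) im.1 []) im.2)
        (PySem.Dict.empty, PySem.Dict.empty)
      = ((pvL messages metadata (PySem.Dict.mk idx_to_word)).foldl pvStepTA PySem.Dict.empty,
         (pvL messages metadata (PySem.Dict.mk idx_to_word)).foldl pvStepAA PySem.Dict.empty) := by
    rw [key1, key2, key3, c1, c2]
  exact congrArg (fun st : pvDD × pvDD =>
    (List.map (fun p : String × pvCnt => (p.1, p.2.items)) st.1.items,
     List.map (fun p : String × pvCnt => (p.1, p.2.items)) st.2.items)) key

theorem pvS_flat (messages : List (List Int)) (metadata : List (List (String × List (List (Option String))))) (idx_to_word : List (Int × String)) :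
    pvS messages metadata idx_to_word
      = (pvL messages metadata (PySem.Dict.mk idx_to_word)).flatMap (fun x => x.1.map (fun t => (t, x.2))) := by
  simp only [pvS, pvL, List.flatMap_map, List.map_map]
  rfl

theorem pvFlat1 (messages : List (List Int)) (metadata : List (List (String × List (List (Option String))))) (idx_to_word : List (Int × String)) (d : pvDD) :
    (pvS messages metadata idx_to_word).foldl pvStep1 d
      = (pvL messages metadata (PySem.Dict.mk idx_to_word)).foldl pvStepTA d := by
  rw [pvS_flat, List.foldl_flatMap]
  apply PySem.List.foldl_congr_mem
  intro acc x _
  rw [List.foldl_map]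
  rfl

theorem pvFlat2 (messages : List (List Int)) (metadata : List (List (String × List (List (Option String))))) (idx_to_word : List (Int × String)) (d : pvDD) :
    (pvS messages metadata idx_to_word).foldl pvStep2 d
      = (pvL messages metadata (PySem.Dict.mk idx_to_word)).foldl pvStepAA d := by
  rw [pvS_flat, List.foldl_flatMap]
  apply PySem.List.foldl_congr_mem
  intro acc x _
  rw [List.foldl_map]
  rfl

theorem pvACanon (messages : List (List Int)) (metadata : List (List (String × List (List (Option String))))) (idx_to_word : List (Int × String))
    (h : messages.length ≤ metadata.length) :
    get_attributes_dicts messages metadata idx_to_word =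
      ((((pvS messages metadata idx_to_word).foldl pvStep1 PySem.Dict.empty).items.map (fun p => (p.1, p.2.items))),
       (((pvS messages metadata idx_to_word).foldl pvStep2 PySem.Dict.empty).items.map (fun p => (p.1, p.2.items)))) := by
  rw [pvA_core messages metadata idx_to_word h, ← pvFlat1, ← pvFlat2]


-- ---------- reduction of PORT B to the canonical flat fold ----------

theorem pvBPairs (messages : List (List Int)) (metadata : List (List (String × List (List (Option String))))) (idx_to_word : List (Int × String)) :
    (messages.zip metadata).foldl
        (fun (pr : pvPD) mmd => mmd.1.foldl (fun pr ti =>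
          (pvFeatureCounter mmd.2).items.foldl
            (fun pr p => pr.modify (pvLook idx_to_word ti, p.1) 0 (· + p.2)) pr) pr)
        PySem.Dict.empty
      = (pvS messages metadata idx_to_word).foldl pvPStep PySem.Dict.empty := by
  rw [show pvS messages metadata idx_to_word
      = (messages.zip metadata).flatMap (fun p => p.1.map (fun ti => (pvLook idx_to_word ti, get_feature_ids p.2))) from rfl,
    List.foldl_flatMap]
  apply PySem.List.foldl_congr_mem
  intro pr p _
  rw [List.foldl_map]
  apply PySem.List.foldl_congr_mem
  intro pr2 ti _
  show (pvFeatureCounter p.2).items.foldl _ pr2 = pvPStep pr2 (pvLook idx_to_word ti, get_feature_ids p.2)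
  unfold pvPStep
  rw [pvFC_eq]

theorem pvBSeen (messages : List (List Int)) (metadata : List (List (String × List (List (Option String))))) (idx_to_word : List (Int × String)) :
    (messages.zip metadata).foldl
        (fun (se : PySem.Set String) mmd => mmd.1.foldl (fun se ti => PySem.Set.add se (pvLook idx_to_word ti)) se)
        PySem.Set.empty
      = PySem.Set.ofList ((pvS messages metadata idx_to_word).map (fun s => s.1)) := by
  have hT : (pvS messages metadata idx_to_word).map (fun s => s.1)
      = (messages.zip metadata).flatMap (fun p => p.1.map (fun ti => pvLook idx_to_word ti)) := by
    simp only [pvS, List.map_flatMap, List.map_map]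
    rfl
  rw [hT, PySem.Set.ofList_eq_foldl, List.foldl_flatMap]
  apply PySem.List.foldl_congr_mem
  intro se p _
  rw [List.foldl_map]

theorem pvB_core (messages : List (List Int)) (metadata : List (List (String × List (List (Option String))))) (idx_to_word : List (Int × String)) :
    get_attributes_dicts_alt messages metadata idx_to_word =
      ((((pvS messages metadata idx_to_word).foldl pvPStep PySem.Dict.empty).items.foldl
          (fun d q => d.modify q.1.1 PySem.Dict.empty (fun c => c.insert q.1.2 q.2))
          ((PySem.Set.ofList ((pvS messages metadata idx_to_word).map (fun s => s.1))).foldl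
            (fun d t => d.insert t PySem.Dict.empty) PySem.Dict.empty)).items.map (fun p => (p.1, p.2.items)),
       (((pvS messages metadata idx_to_word).foldl pvPStep PySem.Dict.empty).items.foldl
          (fun d q => (d.setdefault q.1.2 PySem.Dict.empty).modify q.1.2 PySem.Dict.empty
            (fun c => c.insert q.1.1 q.2)) PySem.Dict.empty).items.map (fun p => (p.1, p.2.items))) := by
  have hstep : ∀ (st : pvPD × PySem.Set String) (mmd : List Int × List (String × List (List (Option String)))),
      (let fc := pvFeatureCounter mmd.2
       mmd.1.foldl (fun st token_idx =>
         let token := (PySem.Dict.mk idx_to_word).getD token_idx ""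
         (fc.items.foldl (fun pr p => pr.modify (token, p.1) 0 (· + p.2)) st.1,
          PySem.Set.add st.2 token)) st)
      = (mmd.1.foldl (fun pr ti =>
           (pvFeatureCounter mmd.2).items.foldl
             (fun pr p => pr.modify (pvLook idx_to_word ti, p.1) 0 (· + p.2)) pr) st.1,
         mmd.1.foldl (fun se ti => PySem.Set.add se (pvLook idx_to_word ti)) st.2) := by
    intro st mmd
    obtain ⟨a, b⟩ := st
    exact PySem.List.foldl_prod_mk
      (fun pr ti => (pvFeatureCounter mmd.2).items.foldl
        (fun pr p => pr.modify ((PySem.Dict.mk idx_to_word).getD ti "", p.1) 0 (· + p.2)) pr)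
      (fun se ti => PySem.Set.add se ((PySem.Dict.mk idx_to_word).getD ti ""))
      mmd.1 a b
  have k1 : (messages.zip metadata).foldl
      (fun (st : pvPD × PySem.Set String) mmd =>
        let fc := pvFeatureCounter mmd.2
        mmd.1.foldl (fun st token_idx =>
          let token := (PySem.Dict.mk idx_to_word).getD token_idx ""
          (fc.items.foldl (fun pr p => pr.modify (token, p.1) 0 (· + p.2)) st.1,
           PySem.Set.add st.2 token)) st)
      (PySem.Dict.empty, PySem.Set.empty)
      = ((pvS messages metadata idx_to_word).foldl pvPStep PySem.Dict.empty,
         PySem.Set.ofList ((pvS messages metadata idx_to_word).map (fun s => s.1))) := by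
    rw [PySem.List.foldl_congr_mem _ _ _ _ (fun st mmd _ => hstep st mmd),
      PySem.List.foldl_prod_mk
        (fun pr (mmd : List Int × List (String × List (List (Option String)))) =>
          mmd.1.foldl (fun pr ti =>
            (pvFeatureCounter mmd.2).items.foldl
              (fun pr p => pr.modify (pvLook idx_to_word ti, p.1) 0 (· + p.2)) pr) pr)
        (fun se (mmd : List Int × List (String × List (List (Option String)))) =>
          mmd.1.foldl (fun se ti => PySem.Set.add se (pvLook idx_to_word ti)) se)
        (messages.zip metadata) PySem.Dict.empty PySem.Set.empty,
      pvBPairs, pvBSeen]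
  show (fun (st : pvPD × PySem.Set String) =>
      (let tta0 : pvDD := st.2.foldl (fun d t => d.insert t PySem.Dict.empty) PySem.Dict.empty
       let fin := st.1.items.foldl
         (fun (f : pvDD × pvDD) q =>
           (f.1.modify q.1.1 PySem.Dict.empty (fun c => c.insert q.1.2 q.2),
            (f.2.setdefault q.1.2 PySem.Dict.empty).modify q.1.2 PySem.Dict.empty (fun c => c.insert q.1.1 q.2)))
         (tta0, PySem.Dict.empty)
       (fin.1.items.map (fun p => (p.1, p.2.items)), fin.2.items.map (fun p => (p.1, p.2.items)))))
      ((messages.zip metadata).foldl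
        (fun (st : pvPD × PySem.Set String) mmd =>
          let fc := pvFeatureCounter mmd.2
          mmd.1.foldl (fun st token_idx =>
            let token := (PySem.Dict.mk idx_to_word).getD token_idx ""
            (fc.items.foldl (fun pr p => pr.modify (token, p.1) 0 (· + p.2)) st.1,
             PySem.Set.add st.2 token)) st)
        (PySem.Dict.empty, PySem.Set.empty))
    = _
  rw [k1]
  exact congrArg (fun fin : pvDD × pvDD =>
      (fin.1.items.map (fun p => (p.1, p.2.items)), fin.2.items.map (fun p => (p.1, p.2.items))))
    (PySem.List.foldl_prod_mk
      (fun d q => d.modify q.1.1 PySem.Dict.empty (fun c => c.insert q.1.2 q.2))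
      (fun d q => (d.setdefault q.1.2 PySem.Dict.empty).modify q.1.2 PySem.Dict.empty (fun c => c.insert q.1.1 q.2))
      ((pvS messages metadata idx_to_word).foldl pvPStep PySem.Dict.empty).items
      ((PySem.Set.ofList ((pvS messages metadata idx_to_word).map (fun s => s.1))).foldl
        (fun d t => d.insert t PySem.Dict.empty) PySem.Dict.empty)
      PySem.Dict.empty)

-- ===== VERDICT (by name: the statement is the Claim_ definition above) =====
theorem get_attributes_dicts_spec : Claim_equal_get_attributes_dicts := by
  intro messages metadata idx_to_word _ hpre
  unfold Spec_get_attributes_dicts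
  rw [pvACanon messages metadata idx_to_word hpre.1, pvB_core messages metadata idx_to_word,
    pvPairsEq, pvFin1Eq, pvFin2Eq]
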